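-- pv_equiv track=rewrite | github.com/zyusong0614/Context-Aware-Analytics-Agent | cli/ca3_core/config/databases/clickhouse.py | _summarize_table_ddl
-- ===== SOURCE A (Python) =====
-- def _summarize_table_ddl(ddl: str) -> str:
--     """Return a concise table metadata summary extracted from SHOW CREATE TABLE."""
--
--     def _lines_with_depth(sql: str) -> list[tuple[str, str, int]]:
--         depth = 0
--         out: list[tuple[str, str, int]] = []
--         for raw in sql.splitlines():
--             line = raw.strip().rstrip(",")
--             if not line:
--                 continue
--             out.append((line, line.upper(), depth))
--             depth += raw.count("(") - raw.count(")")
--             if depth < 0: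
--                 depth = 0
--         return out
--
--     lines = _lines_with_depth(ddl)
--     summary: list[str] = []
--
--     # Keep object header line for context (table name).
--     for line, upper, depth in lines:
--         if depth == 0 and upper.startswith("CREATE TABLE"):
--             summary.append(line)
--             break
--
--     for prefix in ("ENGINE =", "PARTITION BY", "PRIMARY KEY", "ORDER BY", "SAMPLE BY", "TTL", "SETTINGS"):
--         for line, upper, depth in lines:
--             if depth == 0 and upper.startswith(prefix):
--                 summary.append(line)
--                 break
--
--     projections = [line for line, upper, _ in lines if upper.startswith("PROJECTION ")]
--     if projections:
--         summary.append("PROJECTIONS:")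
--         summary.extend(f"  {line}" for line in projections)
--
--     # If parsing misses everything (unexpected format), fall back to raw DDL.
--     return "\n".join(summary) if summary else ddl
-- ===== SOURCE B (Python) =====
-- def _summarize_table_ddl(ddl: str) -> str:
--     """Return a concise table metadata summary extracted from SHOW CREATE TABLE."""
--
--     def _lines_with_depth(sql: str) -> list[tuple[str, str, int]]:
--         depth = 0
--         out: list[tuple[str, str, int]] = []
--         for raw in sql.splitlines():
--             line = raw.strip().rstrip(",")
--             if not line:
--                 continue
--             out.append((line, line.upper(), depth))
--             depth += raw.count("(") - raw.count(")")
--             if depth < 0: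
--                 depth = 0
--         return out
--
--     prefixes = ("ENGINE =", "PARTITION BY", "PRIMARY KEY", "ORDER BY", "SAMPLE BY", "TTL", "SETTINGS")
--
--     # One classifying pass: first depth-0 match per prefix, first header, all projections.
--     header = None
--     found: dict[str, str] = {}
--     projections: list[str] = []
--     for line, upper, depth in _lines_with_depth(ddl):
--         if depth == 0:
--             if header is None and upper.startswith("CREATE TABLE"):
--                 header = line
--             for p in prefixes:
--                 if p not in found and upper.startswith(p):
--                     found[p] = line
--         if upper.startswith("PROJECTION "):
--             projections.append(line)
--
--     # Ordered emission.
--     summary: list[str] = []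
--     if header is not None:
--         summary.append(header)
--     for p in prefixes:
--         if p in found:
--             summary.append(found[p])
--     if projections:
--         summary.append("PROJECTIONS:")
--         summary.extend(f"  {line}" for line in projections)
--
--     return "\n".join(summary) if summary else ddl
-- ===== Notes on version B (the rewrite author's own statement) =====
-- stated objective: alternative
-- what changed: A rescans the line list once per prefix (prefix-outer, line-inner) plus separate header and projection scans; B makes one classifying pass over the lines (first depth-0 line per prefix into a dict, first header, projections accumulated) and then emits in the fixed prefix order.
import Mathlib
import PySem

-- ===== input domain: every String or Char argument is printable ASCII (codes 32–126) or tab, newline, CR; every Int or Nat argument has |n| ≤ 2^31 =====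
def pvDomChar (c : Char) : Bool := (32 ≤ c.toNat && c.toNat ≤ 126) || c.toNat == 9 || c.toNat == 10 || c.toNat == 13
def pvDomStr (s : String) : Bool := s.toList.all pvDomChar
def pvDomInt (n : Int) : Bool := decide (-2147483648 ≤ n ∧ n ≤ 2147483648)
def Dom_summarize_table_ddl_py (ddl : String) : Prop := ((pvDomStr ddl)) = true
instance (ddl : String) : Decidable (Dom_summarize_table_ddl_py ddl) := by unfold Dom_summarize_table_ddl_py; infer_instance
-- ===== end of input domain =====

-- B replaces A's per-prefix rescans of the line list by one classifying pass (first depth-0 match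
-- per prefix into a dict, header, projections) followed by an ordered emission; objective: alternative.

-- ===== PORT A =====

-- Python str.rstrip(",") ported by hand: drop trailing ',' characters (exact).
def pvRstripComma (s : String) : String :=
  String.ofList ((s.toList.reverse.dropWhile (fun c => c == ',')).reverse)

-- shared helper _lines_with_depth (identical in A and in B)
def pvLinesWithDepth (sql : String) : List (String × String × Int) :=
  ((PySem.Str.splitlines sql).foldl
    (fun (st : Int × List (String × String × Int)) raw =>
      let line := pvRstripComma (PySem.Str.strip raw)
      if line = "" then st
      else
        let out := st.2 ++ [(line, PySem.Str.upper line, st.1)]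
        let d := st.1 + (PySem.Str.count raw "(" : Int) - (PySem.Str.count raw ")" : Int)
        (if d < 0 then 0 else d, out))
    (0, [])).2

def pvPrefixes : List String :=
  ["ENGINE =", "PARTITION BY", "PRIMARY KEY", "ORDER BY", "SAMPLE BY", "TTL", "SETTINGS"]

def summarize_table_ddl_py (ddl : String) : String :=
  let lines := pvLinesWithDepth ddl
  let summary : List String :=
    match lines.find? (fun t => t.2.2 == 0 && PySem.Str.startswith t.2.1 "CREATE TABLE") with
    | some t => [t.1]
    | none => []
  let summary := pvPrefixes.foldl (fun s p =>
      match lines.find? (fun t => t.2.2 == 0 && PySem.Str.startswith t.2.1 p) with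
      | some t => s ++ [t.1]
      | none => s) summary
  let projections := (lines.filter (fun t => PySem.Str.startswith t.2.1 "PROJECTION ")).map (fun t => t.1)
  let summary := if projections.isEmpty then summary
    else summary ++ ["PROJECTIONS:"] ++ projections.map (fun l => String.ofList (' ' :: ' ' :: l.toList))
  if summary.isEmpty then ddl else PySem.Str.join "\n" summary

-- ===== PORT B =====

-- the three per-line state updates of B's single classifying loop
def pvStepHeader (h : Option String) (t : String × String × Int) : Option String :=
  if t.2.2 == 0 && h.isNone && PySem.Str.startswith t.2.1 "CREATE TABLE" then some t.1 else h

def pvStepFound (d : PySem.Dict String String) (t : String × String × Int) : PySem.Dict String String :=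
  if t.2.2 == 0 then
    pvPrefixes.foldl (fun d p =>
      if !d.contains p && PySem.Str.startswith t.2.1 p then d.insert p t.1 else d) d
  else d

def pvStepProj (pr : List String) (t : String × String × Int) : List String :=
  if PySem.Str.startswith t.2.1 "PROJECTION " then pr ++ [t.1] else pr

-- B's single pass over the lines
def pvClassify (lines : List (String × String × Int)) :
    Option String × PySem.Dict String String × List String :=
  lines.foldl (fun st t => (pvStepHeader st.1 t, pvStepFound st.2.1 t, pvStepProj st.2.2 t))
    (none, PySem.Dict.empty, [])

def summarize_table_ddl_py_alt (ddl : String) : String :=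
  let st := pvClassify (pvLinesWithDepth ddl)
  let summary : List String := match st.1 with | some h => [h] | none => []
  let summary := pvPrefixes.foldl (fun s p =>
      match st.2.1.get? p with
      | some v => s ++ [v]
      | none => s) summary
  let summary := if st.2.2.isEmpty then summary
    else summary ++ ["PROJECTIONS:"] ++ st.2.2.map (fun l => String.ofList (' ' :: ' ' :: l.toList))
  if summary.isEmpty then ddl else PySem.Str.join "\n" summary

-- ===== PRECONDITION & SPEC =====
def Spec_summarize_table_ddl_py (ddl : String) (out : String) : Prop := out = summarize_table_ddl_py_alt ddl
instance (ddl : String) (out : String) : Decidable (Spec_summarize_table_ddl_py ddl out) := by unfold Spec_summarize_table_ddl_py; infer_instance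

-- ===== CLAIM (what is proved, stated in full; the proofs are below) =====
def Claim_equal_summarize_table_ddl_py : Prop := ∀ (ddl : String), Dom_summarize_table_ddl_py ddl → Spec_summarize_table_ddl_py ddl (summarize_table_ddl_py ddl)

-- ===== LEMMAS AND PROOFS =====

-- a fold whose state components are updated independently splits into three folds
theorem pvClassify_eq (lines : List (String × String × Int)) :
    pvClassify lines =
      (lines.foldl pvStepHeader none,
       lines.foldl pvStepFound PySem.Dict.empty,
       lines.foldl pvStepProj []) := by
  unfold pvClassify
  generalize (none : Option String) = h
  generalize (PySem.Dict.empty : PySem.Dict String String) = d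
  generalize ([] : List String) = pr
  induction lines generalizing h d pr with
  | nil => rfl
  | cons t ts ih => simpa [List.foldl_cons] using ih (pvStepHeader h t) (pvStepFound d t) (pvStepProj pr t)

-- a first-capture loop over an Option equals find? (a, b opaque so simp cannot unfold the predicate)
theorem pvFirst_eq (a b : (String × String × Int) → Bool) (l : List (String × String × Int))
    (h : Option String) :
    l.foldl (fun h t => if a t && h.isNone && b t then some t.1 else h) h =
      h.or ((l.find? (fun t => a t && b t)).map (fun t => t.1)) := by
  induction l generalizing h with
  | nil => cases h <;> rfl
  | cons t ts ih =>
    rw [List.foldl_cons, ih, List.find?]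
    cases h with
    | some x => simp
    | none =>
      simp only [Option.isNone_none, Bool.and_true]
      cases hc : (a t && b t) <;> simp

-- one line's inner loop over the prefix list, observed at one key q
theorem pvInner_get (sw : String → Bool) (v : String) (ps : List String)
    (d : PySem.Dict String String) (q : String) :
    (ps.foldl (fun d p => if !d.contains p && sw p then d.insert p v else d) d).get? q =
      if q ∈ ps ∧ d.contains q = false ∧ sw q = true then some v else d.get? q := by
  induction ps generalizing d with
  | nil => simp
  | cons p ps ih =>
    rw [List.foldl_cons, ih]
    by_cases hpq : p = q
    · subst hpq
      by_cases hc : d.contains p = false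
      · by_cases hs : sw p = true
        · simp [hc, hs, PySem.Dict.contains_insert_self, PySem.Dict.get?_insert_self]
        · simp [hc, hs]
      · simp [hc]
    · have hg : (if !d.contains p && sw p then d.insert p v else d).get? q = d.get? q := by
        split
        · exact PySem.Dict.get?_insert_of_ne d v (fun h => hpq h.symm)
        · rfl
      have hcnt : (if !d.contains p && sw p then d.insert p v else d).contains q
          = d.contains q := by
        split
        · rw [PySem.Dict.contains_insert]
          simp [show (q == p) = false by simpa using fun h => hpq h.symm]
        · rfl
      rw [hg, hcnt]
      have hm : q ∈ p :: ps ↔ q ∈ ps :=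
        List.mem_cons.trans (or_iff_right (fun h => hpq h.symm))
      simp only [hm]

-- the whole classifying pass, looked up at a prefix q, equals the find?-scan for q
theorem pvFoundGen (z : (String × String × Int) → Bool)
    (sw : (String × String × Int) → String → Bool) (ps : List String)
    (L : List (String × String × Int)) (d : PySem.Dict String String)
    (q : String) (hq : q ∈ ps) :
    (L.foldl (fun d t =>
        if z t then
          ps.foldl (fun d p => if !d.contains p && sw t p then d.insert p t.1 else d) d
        else d) d).get? q =
      (d.get? q).or ((L.find? (fun t => z t && sw t q)).map (fun t => t.1)) := by
  induction L generalizing d with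
  | nil => simp
  | cons t ts ih =>
    rw [List.foldl_cons, ih, List.find?]
    cases hz : z t with
    | false => simp
    | true =>
      rw [if_pos (rfl : (true : Bool) = true)]
      simp only [Bool.true_and]
      cases hd : d.get? q with
      | some v =>
        have hc : d.contains q = true := by rw [PySem.Dict.contains_eq_isSome_get?, hd]; rfl
        rw [pvInner_get]
        rw [if_neg (by simp [hc]), hd]
        simp
      | none =>
        have hc : d.contains q = false := by rw [PySem.Dict.contains_eq_isSome_get?, hd]; rfl
        rw [pvInner_get]
        cases hs : sw t q with
        | true => simp [hq, hc]
        | false => simp [hq, hc, hd]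

-- B's dict lookup at each prefix therefore reproduces A's per-prefix scan
theorem pvFound_get (lines : List (String × String × Int)) (q : String) (hq : q ∈ pvPrefixes) :
    (lines.foldl pvStepFound PySem.Dict.empty).get? q =
      (lines.find? (fun t => t.2.2 == 0 && PySem.Str.startswith t.2.1 q)).map (fun t => t.1) := by
  have h := pvFoundGen (fun t => t.2.2 == 0) (fun t p => PySem.Str.startswith t.2.1 p)
    pvPrefixes lines PySem.Dict.empty q hq
  rw [PySem.Dict.get?_empty, Option.none_or] at h
  exact h

-- B's accumulated projections equal A's filter-and-map
theorem pvProj_eq (lines : List (String × String × Int)) (pr : List String) :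
    lines.foldl pvStepProj pr =
      pr ++ (lines.filter (fun t => PySem.Str.startswith t.2.1 "PROJECTION ")).map (fun t => t.1) := by
  unfold pvStepProj
  exact PySem.List.foldl_append_if _ _ _ _

-- the two emission folds over the prefixes agree
theorem pvEmit_eq (lines : List (String × String × Int)) (s : List String) :
    pvPrefixes.foldl (fun s p =>
        match (lines.foldl pvStepFound PySem.Dict.empty).get? p with
        | some v => s ++ [v]
        | none => s) s =
      pvPrefixes.foldl (fun s p =>
        match lines.find? (fun t => t.2.2 == 0 && PySem.Str.startswith t.2.1 p) with
        | some t => s ++ [t.1]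
        | none => s) s := by
  apply PySem.List.foldl_congr_mem
  intro s p hp
  rw [pvFound_get lines p hp]
  cases lines.find? (fun t => t.2.2 == 0 && PySem.Str.startswith t.2.1 p) <;> rfl

-- the header match through Option.map
theorem pvOptList (o : Option (String × String × Int)) :
    (match o.map (fun t => t.1) with
     | some h => [h]
     | none => ([] : List String)) =
      (match o with | some t => [t.1] | none => []) := by
  cases o <;> rfl

theorem pvHeader_eq (lines : List (String × String × Int)) :
    lines.foldl pvStepHeader none =
      (lines.find? (fun t => t.2.2 == 0 && PySem.Str.startswith t.2.1 "CREATE TABLE")).map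
        (fun t => t.1) := by
  have h := pvFirst_eq (fun t => t.2.2 == 0)
    (fun t => PySem.Str.startswith t.2.1 "CREATE TABLE") lines none
  rw [Option.none_or] at h
  exact h

theorem pvMain (ddl : String) : summarize_table_ddl_py ddl = summarize_table_ddl_py_alt ddl := by
  simp only [summarize_table_ddl_py, summarize_table_ddl_py_alt, pvClassify_eq, pvHeader_eq,
    pvProj_eq, pvOptList, pvEmit_eq, List.nil_append]

-- ===== VERDICT (by name: the statement is the Claim_ definition above) =====
theorem summarize_table_ddl_py_spec : Claim_equal_summarize_table_ddl_py := by
  intro ddl _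
  unfold Spec_summarize_table_ddl_py
  exact pvMain ddl
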